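-- pv_equiv track=rewrite | github.com/AdamZhouSE/pythonHomework | Code/CodeRecords/2120/60715/299969.py | BigestMul
-- ===== SOURCE A (Python) =====
-- def BigestMul(n):
--     if n <= 3:
--         return n - 1
--     dp = [0] * (n + 1)
--     dp[1:4] = [1, 2, 3]
--     for i in range(4, n + 1):
--         dp[i] = max(2 * dp[i - 2], 3 * dp[i - 3])
--     return dp[n]
-- ===== SOURCE B (Python) =====
-- def BigestMul(n):
--     if n <= 3:
--         return n - 1
--     q, r = divmod(n, 3)
--     if r == 0:
--         return 3 ** q
--     if r == 1:
--         return 4 * 3 ** (q - 1)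
--     return 2 * 3 ** q
-- ===== Notes on version B (the rewrite author's own statement) =====
-- stated objective: faster
-- what changed: Replaced the O(n) DP array loop by the closed form of the integer-break recurrence: a case split on n mod 3 with one fast power of 3.
import Mathlib
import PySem

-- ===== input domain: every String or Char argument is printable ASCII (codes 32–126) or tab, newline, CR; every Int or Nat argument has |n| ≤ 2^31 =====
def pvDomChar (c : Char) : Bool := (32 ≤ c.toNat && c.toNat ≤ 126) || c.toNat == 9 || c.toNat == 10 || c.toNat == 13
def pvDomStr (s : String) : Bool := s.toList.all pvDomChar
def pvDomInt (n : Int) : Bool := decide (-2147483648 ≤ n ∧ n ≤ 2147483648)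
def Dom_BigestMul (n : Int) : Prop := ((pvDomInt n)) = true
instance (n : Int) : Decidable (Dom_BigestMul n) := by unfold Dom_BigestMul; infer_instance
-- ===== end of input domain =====

-- B replaces A's O(n) DP loop by the closed form (case split on n mod 3, one power of 3); objective: faster.

-- ===== PORT A =====
-- dp[1:4] = [1,2,3] is transliterated as three in-range sets; indices 4..n are
-- nonnegative and in range, so Nat indexing via n.toNat is exact here.
def BigestMul (n : Int) : Int :=
  if n ≤ 3 then n - 1
  else
    let N := n.toNat
    let dp0 := (((List.replicate (N + 1) (0 : Int)).set 1 1).set 2 2).set 3 3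
    let dp := (List.range' 4 (N - 3)).foldl
      (fun d i => d.set i (max (2 * d[i - 2]!) (3 * d[i - 3]!))) dp0
    dp[N]!

-- ===== PORT B =====
-- divmod(n,3) → PySem.Int.floordiv/mod; 3 ** k → Lean's power (exponent ≥ 0 here).
def BigestMul_alt (n : Int) : Int :=
  if n ≤ 3 then n - 1
  else
    let q := PySem.Int.floordiv n 3
    let r := PySem.Int.mod n 3
    if r = 0 then 3 ^ q.toNat
    else if r = 1 then 4 * 3 ^ (q - 1).toNat
    else 2 * 3 ^ q.toNat

-- ===== PRECONDITION & SPEC =====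
def Spec_BigestMul (n : Int) (out : Int) : Prop := out = BigestMul_alt n
instance (n : Int) (out : Int) : Decidable (Spec_BigestMul n out) := by unfold Spec_BigestMul; infer_instance

-- ===== CLAIM (what is proved, stated in full; the proofs are below) =====
def Claim_equal_BigestMul : Prop := ∀ (n : Int), Dom_BigestMul n → Spec_BigestMul n (BigestMul n)

-- ===== LEMMAS AND PROOFS =====

/-- Closed form of the DP value at index `m`. -/
def pvG (m : Nat) : Int :=
  if m ≤ 3 then (m : Int)
  else if m % 3 = 0 then 3 ^ (m / 3)
  else if m % 3 = 1 then 4 * 3 ^ (m / 3 - 1)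
  else 2 * 3 ^ (m / 3)

/-- The closed form satisfies A's DP recurrence. -/
lemma pvG_rec (m : Nat) (h : 4 ≤ m) :
    pvG m = max (2 * pvG (m - 2)) (3 * pvG (m - 3)) := by
  rcases (by omega : m ≤ 6 ∨ 6 < m) with h6 | h6
  · interval_cases m <;> decide
  · have hpos : ∀ a : Nat, (0:Int) < 3 ^ a := fun a => pow_pos (by norm_num) a
    have hr : m % 3 = 0 ∨ m % 3 = 1 ∨ m % 3 = 2 := by omega
    rcases hr with hr | hr | hr
    · -- m = 3k, k ≥ 3
      obtain ⟨a, ha⟩ : ∃ a, m / 3 = a + 3 := ⟨m / 3 - 3, by omega⟩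
      have e1 : pvG m = 3 ^ (a + 3) := by rw [pvG, if_neg (by omega), if_pos hr, ha]
      have e2 : pvG (m - 2) = 4 * 3 ^ (a + 1) := by
        rw [pvG, if_neg (by omega), if_neg (by omega), if_pos (by omega),
          show (m - 2) / 3 - 1 = a + 1 from by omega]
      have e3 : pvG (m - 3) = 3 ^ (a + 2) := by
        rw [pvG, if_neg (by omega), if_pos (by omega),
          show (m - 3) / 3 = a + 2 from by omega]
      rw [e1, e2, e3, max_eq_right (by rw [show ((3:Int)) ^ (a + 2) = 3 * 3 ^ (a + 1) from by ring]; linarith [hpos (a + 1)])]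
      ring
    · -- m = 3k+1, k ≥ 2
      obtain ⟨a, ha⟩ : ∃ a, m / 3 = a + 2 := ⟨m / 3 - 2, by omega⟩
      have e1 : pvG m = 4 * 3 ^ (a + 1) := by
        rw [pvG, if_neg (by omega), if_neg (by omega), if_pos hr,
          show m / 3 - 1 = a + 1 from by omega]
      have e2 : pvG (m - 2) = 2 * 3 ^ (a + 1) := by
        rw [pvG, if_neg (by omega), if_neg (by omega), if_neg (by omega),
          show (m - 2) / 3 = a + 1 from by omega]
      have e3 : pvG (m - 3) = 4 * 3 ^ a := by
        rw [pvG, if_neg (by omega), if_neg (by omega), if_pos (by omega),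
          show (m - 3) / 3 - 1 = a from by omega]
      rw [e1, e2, e3, max_eq_right (le_of_eq (by ring))]
      ring
    · -- m = 3k+2, k ≥ 2
      obtain ⟨a, ha⟩ : ∃ a, m / 3 = a + 2 := ⟨m / 3 - 2, by omega⟩
      have e1 : pvG m = 2 * 3 ^ (a + 2) := by
        rw [pvG, if_neg (by omega), if_neg (by omega), if_neg (by omega),
          show m / 3 = a + 2 from by omega]
      have e2 : pvG (m - 2) = 3 ^ (a + 2) := by
        rw [pvG, if_neg (by omega), if_pos (by omega),
          show (m - 2) / 3 = a + 2 from by omega]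
      have e3 : pvG (m - 3) = 2 * 3 ^ (a + 1) := by
        rw [pvG, if_neg (by omega), if_neg (by omega), if_neg (by omega),
          show (m - 3) / 3 = a + 1 from by omega]
      rw [e1, e2, e3, max_eq_left (le_of_eq (by ring))]

/-- Invariant of A's loop: after processing range(4, 4+t), the list has length N+1
    and holds the closed form at every index ≤ 3+t. -/
lemma pvLoop_inv (N t : Nat) (hN : 4 ≤ N) (ht : t ≤ N - 3) :
    ((List.range' 4 t).foldl
        (fun d i => d.set i (max (2 * d[i - 2]!) (3 * d[i - 3]!)))
        ((((List.replicate (N + 1) (0 : Int)).set 1 1).set 2 2).set 3 3)).length = N + 1 ∧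
    ∀ j, j ≤ 3 + t →
      ((List.range' 4 t).foldl
        (fun d i => d.set i (max (2 * d[i - 2]!) (3 * d[i - 3]!)))
        ((((List.replicate (N + 1) (0 : Int)).set 1 1).set 2 2).set 3 3))[j]! = pvG j := by
  induction t with
  | zero =>
    refine ⟨by simp, ?_⟩
    intro j hj
    rw [getElem!_pos _ j (by simp; omega)]
    interval_cases j <;> simp [pvG]
  | succ t ih =>
    obtain ⟨ihlen, ihval⟩ := ih (by omega)
    have hcat : List.range' 4 (t + 1) = List.range' 4 t ++ [4 + t] := by
      simp [List.range'_concat]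
    rw [hcat, List.foldl_append]
    set d := (List.range' 4 t).foldl
        (fun d i => d.set i (max (2 * d[i - 2]!) (3 * d[i - 3]!)))
        ((((List.replicate (N + 1) (0 : Int)).set 1 1).set 2 2).set 3 3) with hd
    simp only [List.foldl_cons, List.foldl_nil]
    refine ⟨by simp [ihlen], ?_⟩
    intro j hj
    have hlt : j < (d.set (4 + t) (max (2 * d[4 + t - 2]!) (3 * d[4 + t - 3]!))).length := by
      simp [ihlen]; omega
    rw [getElem!_pos _ j hlt, List.getElem_set]
    by_cases hje : 4 + t = j
    · subst hje
      rw [if_pos rfl]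
      have h2 : 4 + t - 2 = t + 2 := by omega
      have h3 : 4 + t - 3 = t + 1 := by omega
      rw [h2, h3, ihval (t + 2) (by omega), ihval (t + 1) (by omega),
        pvG_rec (4 + t) (by omega)]
      congr 1 <;> congr 1 <;> congr 1 <;> omega
    · rw [if_neg hje, ← getElem!_pos _ j (by omega)]
      exact ihval j (by omega)

-- ===== VERDICT (by name: the statement is the Claim_ definition above) =====
theorem BigestMul_spec : Claim_equal_BigestMul := by
  intro n _
  unfold Spec_BigestMul BigestMul BigestMul_alt
  by_cases hle : n ≤ 3
  · simp [hle]
  · rw [if_neg hle, if_neg hle]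
    set N := n.toNat with hNdef
    have hN4 : 4 ≤ N := by omega
    have hNn : (N : Int) = n := Int.toNat_of_nonneg (by omega)
    obtain ⟨_, hval⟩ := pvLoop_inv N (N - 3) hN4 le_rfl
    have hA := hval N (by omega)
    rw [hA]
    -- relate floordiv/mod on n to Nat division on N
    have hq : PySem.Int.floordiv n 3 = ((N / 3 : Nat) : Int) := by
      rw [PySem.Int.floordiv_eq_ediv_of_pos (by norm_num), ← hNn]
      push_cast; ring
    have hr : PySem.Int.mod n 3 = ((N % 3 : Nat) : Int) := by
      rw [PySem.Int.mod_eq_emod_of_pos (by norm_num), ← hNn]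
      push_cast; ring
    rw [hq, hr, pvG, if_neg (by omega)]
    have hq3 : 1 ≤ N / 3 := by omega
    have ht0 : ((N / 3 : Nat) : Int).toNat = N / 3 := by omega
    have ht1 : (((N / 3 : Nat) : Int) - 1).toNat = N / 3 - 1 := by omega
    rcases (by omega : N % 3 = 0 ∨ N % 3 = 1 ∨ N % 3 = 2) with h | h | h
    · rw [if_pos h, if_pos (by exact_mod_cast congrArg (Nat.cast : Nat → Int) h), ht0]
    · rw [if_neg (by omega), if_pos h,
        if_neg (by omega : ¬ ((N % 3 : Nat) : Int) = 0),
        if_pos (by exact_mod_cast congrArg (Nat.cast : Nat → Int) h), ht1]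
    · rw [if_neg (by omega), if_neg (by omega),
        if_neg (by omega : ¬ ((N % 3 : Nat) : Int) = 0),
        if_neg (by omega : ¬ ((N % 3 : Nat) : Int) = 1), ht0]
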